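-- pv_equiv track=rewrite | github.com/SilverEngineered/SliQ | basic_net.py | generate_y_hats
-- ===== SOURCE A (Python) =====
-- def generate_y_hats(y_hat, num_clusters):
--     import itertools
--     perms = list(itertools.permutations(range(num_clusters)))
--     y_hats = []
--     for perm in perms:
--         this_yhat = [perm[i] for i in y_hat]
--         y_hats.append(this_yhat)
--     return y_hats
-- ===== SOURCE B (Python) =====
-- def generate_y_hats(y_hat, num_clusters):
--     def perms(labels):
--         if not labels:
--             return [[]]
--         out = []
--         for i in range(len(labels)):
--             for tail in perms(labels[:i] + labels[i + 1:]):
--                 out.append([labels[i]] + tail)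
--         return out
--     ps = perms(list(range(num_clusters)))
--     cols = {}
--     col_list = []
--     for lab in y_hat:
--         if lab not in cols:
--             cols[lab] = [p[lab] for p in ps]
--         col_list.append(cols[lab])
--     return [[c[t] for c in col_list] for t in range(len(ps))]
-- ===== Notes on version B (the rewrite author's own statement) =====
-- stated objective: alternative
-- what changed: B generates the permutations itself by lexicographic recursion (no itertools), computes one column per distinct label of y_hat (the label's image under every permutation, cached in a dict), and assembles the k! output rows by transposing these columns, instead of A's row-by-row mapping of y_hat under each library permutation.
import Mathlib
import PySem

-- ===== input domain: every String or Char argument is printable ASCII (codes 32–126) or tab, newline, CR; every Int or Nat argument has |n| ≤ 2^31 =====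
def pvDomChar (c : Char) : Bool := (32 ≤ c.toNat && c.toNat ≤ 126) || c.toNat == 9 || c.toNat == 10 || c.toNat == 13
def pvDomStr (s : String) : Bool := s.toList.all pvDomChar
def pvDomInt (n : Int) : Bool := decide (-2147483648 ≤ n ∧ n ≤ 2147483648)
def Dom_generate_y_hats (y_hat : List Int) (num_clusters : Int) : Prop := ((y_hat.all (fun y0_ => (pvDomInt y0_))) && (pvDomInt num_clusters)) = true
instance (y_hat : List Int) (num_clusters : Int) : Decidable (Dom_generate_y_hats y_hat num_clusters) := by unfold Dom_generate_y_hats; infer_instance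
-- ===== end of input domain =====

-- B generates permutations by its own lexicographic recursion, caches one column per distinct label and transposes columns into rows; alternative decomposition, equal values.


-- ===== PORT A =====
def generate_y_hats (y_hat : List Int) (num_clusters : Int) : List (List Int) :=
  let rng := PySem.List.pyRange 0 num_clusters 1
  let perms := PySem.List.permutations rng rng.length
  perms.foldl (fun y_hats perm => y_hats ++ [y_hat.map (fun i => PySem.List.pyGetD perm i 0)]) []

-- ===== PORT B =====
-- Source B's inner `perms(labels)`: lexicographic recursion; `labels[:i] + labels[i+1:]` removes
-- exactly index i (0 ≤ i < len), i.e. eraseIdx i — exact on that range.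
def pvPermsB (labels : List Int) : List (List Int) :=
  if labels.isEmpty then [[]]
  else
    (List.range labels.length).attach.foldl
      (fun out i =>
        out ++ (pvPermsB (labels.eraseIdx i.1)).map
          (fun tail => PySem.List.pyGetD labels (i.1 : Int) 0 :: tail))
      []
termination_by labels.length
decreasing_by
  have hi := List.mem_range.mp i.2
  simp only [List.length_eraseIdx, if_pos hi]
  have : labels.length ≠ 0 := by
    intro h; exact absurd (List.isEmpty_iff_length_eq_zero.mpr h) (by simpa using ‹¬labels.isEmpty = true›)
  omega

def generate_y_hats_alt (y_hat : List Int) (num_clusters : Int) : List (List Int) :=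
  let ps := pvPermsB (PySem.List.pyRange 0 num_clusters 1)
  let st := y_hat.foldl
    (fun (st : PySem.Dict Int (List Int) × List (List Int)) lab =>
      let cols := if st.1.contains lab then st.1
                  else st.1.insert lab (ps.map (fun p => PySem.List.pyGetD p lab 0))
      (cols, st.2 ++ [cols.getD lab []]))
    (PySem.Dict.empty, [])
  (PySem.List.pyRange 0 (ps.length : Int) 1).map
    (fun t => st.2.map (fun c => PySem.List.pyGetD c t 0))

-- ===== PRECONDITION & SPEC =====
-- Pre_: every label of y_hat must index a permutation tuple of length num_clusters without
-- IndexError, i.e. lie in [-num_clusters, num_clusters); on any other input the Python A raises.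
def Pre_generate_y_hats (y_hat : List Int) (num_clusters : Int) : Prop :=
  ∀ i ∈ y_hat, -num_clusters ≤ i ∧ i < num_clusters
instance (y_hat : List Int) (num_clusters : Int) : Decidable (Pre_generate_y_hats y_hat num_clusters) := by unfold Pre_generate_y_hats; infer_instance
def pvWitness_generate_y_hats : List Int × Int := ([0, 1, 0], 2)

def Spec_generate_y_hats (y_hat : List Int) (num_clusters : Int) (out : List (List Int)) : Prop := out = generate_y_hats_alt y_hat num_clusters
instance (y_hat : List Int) (num_clusters : Int) (out : List (List Int)) : Decidable (Spec_generate_y_hats y_hat num_clusters out) := by unfold Spec_generate_y_hats; infer_instance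

-- ===== CLAIM (what is proved, stated in full; the proofs are below) =====
def Claim_equal_generate_y_hats : Prop := ∀ (y_hat : List Int) (num_clusters : Int), Dom_generate_y_hats y_hat num_clusters → Pre_generate_y_hats y_hat num_clusters → Spec_generate_y_hats y_hat num_clusters (generate_y_hats y_hat num_clusters)

-- ===== LEMMAS AND PROOFS =====

-- B's recursive lexicographic generator computes exactly the PySem permutations list.
lemma pvPermsB_eq_permutations : ∀ (n : Nat) (xs : List Int), xs.length = n →
    pvPermsB xs = PySem.List.permutations xs xs.length := by
  intro n
  induction n using Nat.strong_induction_on with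
  | _ n ih =>
    intro xs hlen
    rw [pvPermsB]
    by_cases hxs : xs.isEmpty
    · rw [if_pos hxs]
      have : xs = [] := List.isEmpty_iff.mp hxs
      subst this
      rfl
    · rw [if_neg hxs]
      have hne : xs ≠ [] := by simpa [List.isEmpty_iff] using hxs
      obtain ⟨m, hm⟩ : ∃ m, xs.length = m + 1 := by
        cases xs with
        | nil => exact absurd rfl hne
        | cons a l => exact ⟨l.length, rfl⟩
      rw [List.foldl_attach (l := List.range xs.length)
            (f := fun out j => out ++ (pvPermsB (xs.eraseIdx j)).map
              (fun tail => PySem.List.pyGetD xs (j : Int) 0 :: tail)) (b := [])]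
      rw [PySem.List.foldl_append_eq_flatMap, List.nil_append, hm,
        PySem.List.permutations]
      simp only [hm]
      apply List.flatMap_congr
      intro i hi
      have hilt : i < xs.length := by rw [hm]; exact List.mem_range.mp hi
      rw [List.getElem?_eq_getElem hilt]
      have herase : (xs.eraseIdx i).length = m := by
        rw [List.length_eraseIdx, if_pos hilt]; omega
      rw [ih m (by omega) (xs.eraseIdx i) herase, herase,
        PySem.List.pyGetD_natCast xs i 0, List.getD_eq_getElem xs 0 hilt]

lemma pv_cols_fold (ps : List (List Int)) :
    ∀ (ys : List Int) (d : PySem.Dict Int (List Int)) (acc : List (List Int)),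
    (∀ lab, d.contains lab = true →
        d.getD lab [] = ps.map (fun p => PySem.List.pyGetD p lab 0)) →
    (ys.foldl
      (fun (st : PySem.Dict Int (List Int) × List (List Int)) lab =>
        let cols := if st.1.contains lab then st.1
                    else st.1.insert lab (ps.map (fun p => PySem.List.pyGetD p lab 0))
        (cols, st.2 ++ [cols.getD lab []]))
      (d, acc)).2
    = acc ++ ys.map (fun lab => ps.map (fun p => PySem.List.pyGetD p lab 0)) := by
  intro ys
  induction ys with
  | nil => intro d acc _; simp
  | cons lab ys ih =>
    intro d acc hinv
    simp only [List.foldl_cons, List.map_cons]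
    by_cases hc : d.contains lab
    · rw [if_pos hc]
      rw [ih d (acc ++ [d.getD lab []]) hinv, hinv lab hc, List.append_assoc]
      rfl
    · rw [if_neg hc]
      rw [ih _ _ (fun lab' hc' => ?_), PySem.Dict.getD_insert_self, List.append_assoc]
      · rfl
      · by_cases h : lab' = lab
        · subst h; rw [PySem.Dict.getD_insert_self]
        · rw [PySem.Dict.getD_insert_of_ne _ _ _ h]
          apply hinv
          rw [PySem.Dict.contains_insert] at hc'
          simpa [h] using hc'

-- ===== VERDICT (by name: the statement is the Claim_ definition above) =====
theorem generate_y_hats_spec : Claim_equal_generate_y_hats := by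
  intro y_hat num_clusters _ _
  unfold Spec_generate_y_hats generate_y_hats generate_y_hats_alt
  simp only []
  rw [← pvPermsB_eq_permutations (PySem.List.pyRange 0 num_clusters 1).length
    (PySem.List.pyRange 0 num_clusters 1) rfl]
  set rng := PySem.List.pyRange 0 num_clusters 1
  set ps := pvPermsB rng with hps
  set colF : Int → List Int := fun lab => ps.map (fun p => PySem.List.pyGetD p lab 0) with hcolF
  rw [PySem.List.foldl_append_singleton_eq_map, List.nil_append]
  rw [pv_cols_fold ps y_hat PySem.Dict.empty []
    (fun lab hc => by rw [PySem.Dict.contains_empty] at hc; exact absurd hc (by simp)),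
    List.nil_append]
  rw [PySem.List.pyRange_zero_natCast, List.map_map]
  apply List.ext_getElem
  · simp
  · intro k h1 h2
    simp only [List.getElem_map, List.getElem_range, Function.comp]
    rw [List.map_map]
    apply List.map_congr_left
    intro lab _
    simp only [Function.comp]
    have hk : k < ps.length := by simpa using h1
    rw [PySem.List.pyGetD_natCast, List.getD_eq_getElem _ 0 (by simpa using hk),
      List.getElem_map]
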